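-- pv_equiv track=rewrite | github.com/hoanghdn/triaging_suicidal_tweets | main_model.py | compute_intensity_features
-- ===== SOURCE A (Python) =====
-- from typing import List, Tuple
--
-- def compute_intensity_features(text: str) -> Tuple[int, int, int]:
--     t = text or ""
--     num_excl = t.count("!")
--     # max repeated character run length
--     max_run = 1
--     curr_run = 1
--     for i in range(1, len(t)):
--         if t[i] == t[i - 1]:
--             curr_run += 1
--             if curr_run > max_run:
--                 max_run = curr_run
--         else:
--             curr_run = 1
--     # uppercase words
--     tokens = t.split()
--     num_upper = sum(1 for tok in tokens if tok.isupper() and len(tok) > 1)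
--     return num_excl, max_run, num_upper
-- ===== SOURCE B (Python) =====
-- def compute_intensity_features(text):
--     t = text or ""
--     num_excl = t.count("!")
--     # binary search on the answer: a run of length k exists iff c*k is a substring of t
--     lo, hi = 1, max(len(t), 1)
--     while lo < hi:
--         mid = (lo + hi + 1) // 2
--         if any(c * mid in t for c in set(t)):
--             lo = mid
--         else:
--             hi = mid - 1
--     max_run = lo
--     num_upper = sum(1 for w in t.split()
--                     if w == w.upper() and w != w.lower() and len(w) > 1)
--     return num_excl, max_run, num_upper
-- ===== Notes on version B (the rewrite author's own statement) =====
-- stated objective: alternative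
-- what changed: The longest-run computation is replaced by a binary search on the answer k whose feasibility test asks whether c*k occurs as a substring of t for some character c of set(t), and the uppercase-word test tok.isupper() is replaced by the case-mapping test w == w.upper() and w != w.lower().
import Mathlib
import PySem

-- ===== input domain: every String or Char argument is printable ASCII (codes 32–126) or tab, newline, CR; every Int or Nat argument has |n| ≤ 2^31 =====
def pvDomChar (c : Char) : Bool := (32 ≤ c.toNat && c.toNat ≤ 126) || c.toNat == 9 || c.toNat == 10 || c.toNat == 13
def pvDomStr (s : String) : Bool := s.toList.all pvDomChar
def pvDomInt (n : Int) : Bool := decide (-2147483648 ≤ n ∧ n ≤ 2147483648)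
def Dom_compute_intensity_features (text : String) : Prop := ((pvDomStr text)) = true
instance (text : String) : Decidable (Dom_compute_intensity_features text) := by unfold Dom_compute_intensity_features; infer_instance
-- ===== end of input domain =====

-- B replaces A's single-pass adjacent-comparison loop for the longest run by a binary search
-- on the answer whose feasibility test is a substring query (c*k in t for c in set(t)), and
-- tests uppercase words via w == w.upper() and w != w.lower(); objective: a genuinely
-- different algorithm, not claimed faster.

-- ===== PORT A =====

-- str.isupper(): at least one cased character and no lowercase one; exact on the ASCII
-- domain, where the cased characters are exactly the letters.
def pvStrIsupper (cs : List Char) : Bool :=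
  cs.any PySem.Chars.isupper && cs.all (fun c => !PySem.Chars.islower c)

def compute_intensity_features (text : String) : Int × Int × Int :=
  let t := text.toList
  let num_excl : Int := (PySem.Chars.count t ['!'] : Int)
  -- for i in range(1, len(t)): if t[i] == t[i-1]: curr_run += 1; if curr_run > max_run: …
  let mc := (PySem.List.pyRange 1 (PySem.List.len t) 1).foldl
      (fun (p : Int × Int) i =>
        if PySem.List.pyGetD t i ' ' == PySem.List.pyGetD t (i - 1) ' ' then
          let curr := p.2 + 1
          (if curr > p.1 then curr else p.1, curr)
        else (p.1, 1)) (1, 1)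
  let tokens := PySem.Chars.split₀ t
  let num_upper : Int := tokens.foldl
      (fun acc tok => if pvStrIsupper tok && decide (1 < PySem.Chars.len tok) then acc + 1 else acc) 0
  (num_excl, mc.1, num_upper)

-- ===== PORT B =====

-- any(c * mid in t for c in set(t))
def pvHasRun (t : List Char) (k : Int) : Bool :=
  (PySem.Set.ofList t).any (fun c => PySem.Chars.isIn (PySem.List.pyRepeat [c] k) t)

-- while lo < hi: mid = (lo + hi + 1) // 2; if feasible: lo = mid else hi = mid - 1
-- (fuel-totalized: the gap hi - lo shrinks every iteration, so (hi - lo).toNat steps suffice)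
def pvBS (t : List Char) : Nat → Int → Int → Int
  | 0, lo, _ => lo
  | n + 1, lo, hi =>
    if lo < hi then
      if pvHasRun t (PySem.Int.floordiv (lo + hi + 1) 2) then
        pvBS t n (PySem.Int.floordiv (lo + hi + 1) 2) hi
      else
        pvBS t n lo (PySem.Int.floordiv (lo + hi + 1) 2 - 1)
    else lo

def compute_intensity_features_alt (text : String) : Int × Int × Int :=
  let t := text.toList
  let num_excl : Int := (PySem.Chars.count t ['!'] : Int)
  let max_run : Int := pvBS t (max (PySem.List.len t) 1 - 1).toNat 1 (max (PySem.List.len t) 1)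
  let tokens := PySem.Chars.split₀ t
  let num_upper : Int := tokens.foldl
      (fun acc w =>
        if ((w == PySem.Chars.upper w) && !(w == PySem.Chars.lower w))
            && decide (1 < PySem.Chars.len w) then acc + 1 else acc) 0
  (num_excl, max_run, num_upper)

-- ===== PRECONDITION & SPEC =====
def Spec_compute_intensity_features (text : String) (out : Int × Int × Int) : Prop := out = compute_intensity_features_alt text
instance (text : String) (out : Int × Int × Int) : Decidable (Spec_compute_intensity_features text out) := by unfold Spec_compute_intensity_features; infer_instance

-- ===== CLAIM (what is proved, stated in full; the proofs are below) =====
def Claim_equal_compute_intensity_features : Prop := ∀ (text : String), Dom_compute_intensity_features text → Spec_compute_intensity_features text (compute_intensity_features text)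

-- ===== LEMMAS AND PROOFS =====

-- ---- characterizing A's loop: run lengths of maximal runs ----

def pvRunLensAux (c : Char) (n : Int) : List Char → List Int
  | [] => [n]
  | x :: xs => if x == c then pvRunLensAux c (n + 1) xs else n :: pvRunLensAux x 1 xs

-- pvRunLensAux always emits a first run of length at least n
lemma pvRunLensAux_head (xs : List Char) (c : Char) (n : Int) :
    ∃ h t, pvRunLensAux c n xs = h :: t ∧ n ≤ h := by
  induction xs generalizing c n with
  | nil => exact ⟨n, [], rfl, le_refl n⟩
  | cons x xs ih =>
    by_cases hx : x == c
    · obtain ⟨h, t, he, hle⟩ := ih c (n + 1)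
      exact ⟨h, t, by simp [pvRunLensAux, hx, he], by omega⟩
    · exact ⟨n, pvRunLensAux x 1 xs, by simp [pvRunLensAux, hx], le_refl n⟩

lemma pvGetD_append_cons (pre l : List Char) (c d : Char) :
    PySem.List.pyGetD (pre ++ c :: l) (pre.length : Int) d = c := by
  simp [PySem.List.pyGetD_natCast, List.getD]

-- A's index loop over the suffix c :: rest (sitting after pre) computes the running max of
-- the maximal-run lengths, provided the loop state satisfies 1 ≤ cur ≤ mx.
lemma pvLoop (rest : List Char) : ∀ (pre : List Char) (c : Char) (mx cur : Int),
    1 ≤ cur → cur ≤ mx →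
    ((PySem.List.pyRange ((pre.length : Int) + 1) ((pre.length : Int) + 1 + rest.length) 1).foldl
      (fun (p : Int × Int) i =>
        if PySem.List.pyGetD (pre ++ c :: rest) i ' ' == PySem.List.pyGetD (pre ++ c :: rest) (i - 1) ' ' then
          (if p.2 + 1 > p.1 then p.2 + 1 else p.1, p.2 + 1)
        else (p.1, 1)) (mx, cur)).1
    = (pvRunLensAux c cur rest).foldl max mx := by
  induction rest with
  | nil =>
    intro pre c mx cur h1 h2
    rw [show ((pre.length : Int) + 1 + ([] : List Char).length) = (pre.length : Int) + 1 by simp]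
    simp [PySem.List.pyRange, pvRunLensAux]
    omega
  | cons x xs ih =>
    intro pre c mx cur h1 h2
    rw [PySem.List.pyRange_one_cons (by simp)]
    rw [List.foldl_cons]
    have hx1 : PySem.List.pyGetD (pre ++ c :: x :: xs) ((pre.length : Int) + 1) ' ' = x := by
      have : ((pre.length : Int) + 1) = (((pre ++ [c]).length : Nat) : Int) := by simp
      rw [this, show pre ++ c :: x :: xs = (pre ++ [c]) ++ x :: xs by simp]
      exact pvGetD_append_cons _ _ _ _
    have hx0 : PySem.List.pyGetD (pre ++ c :: x :: xs) ((pre.length : Int) + 1 - 1) ' ' = c := by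
      rw [show ((pre.length : Int) + 1 - 1) = (pre.length : Int) by ring]
      exact pvGetD_append_cons _ _ _ _
    rw [hx1, hx0]
    by_cases hxc : x == c
    · have hceq : x = c := by simpa using hxc
      subst hceq
      simp only [hxc, if_true]
      have := ih (pre ++ [x]) x (if cur + 1 > mx then cur + 1 else mx) (cur + 1) (by omega) (by split <;> omega)
      rw [show (pre ++ [x]) ++ x :: xs = pre ++ x :: x :: xs by simp] at this
      rw [show (((pre ++ [x]).length : Nat) : Int) = (pre.length : Int) + 1 by simp] at this
      rw [show ((pre.length : Int) + 1 + 1 + (xs.length : Int)) = (pre.length : Int) + 1 + ((x :: xs).length : Int) by simp; ring] at this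
      rw [this]
      rw [show pvRunLensAux x cur (x :: xs) = pvRunLensAux x (cur + 1) xs by simp [pvRunLensAux]]
      obtain ⟨h, t, he, hle⟩ := pvRunLensAux_head xs x (cur + 1)
      rw [he, List.foldl_cons, List.foldl_cons]
      congr 1
      omega
    · simp only [hxc, if_false, Bool.false_eq_true]
      have := ih (pre ++ [c]) x mx 1 (le_refl 1) (by omega)
      rw [show (pre ++ [c]) ++ x :: xs = pre ++ c :: x :: xs by simp] at this
      rw [show (((pre ++ [c]).length : Nat) : Int) = (pre.length : Int) + 1 by simp] at this
      rw [show ((pre.length : Int) + 1 + 1 + (xs.length : Int)) = (pre.length : Int) + 1 + ((x :: xs).length : Int) by simp; ring] at this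
      rw [this]
      rw [show pvRunLensAux c cur (x :: xs) = cur :: pvRunLensAux x 1 xs by simp [pvRunLensAux, hxc]]
      rw [List.foldl_cons]
      congr 1
      omega

-- ---- the maximal-run decomposition (char, run length) and its relation to substrings ----

def pvRunsAux (c : Char) (n : Nat) : List Char → List (Char × Nat)
  | [] => [(c, n)]
  | x :: xs => if x == c then pvRunsAux c (n + 1) xs else (c, n) :: pvRunsAux x 1 xs

lemma pvRunLens_cast (xs : List Char) : ∀ (c : Char) (m : Nat),
    pvRunLensAux c (m : Int) xs = (pvRunsAux c m xs).map (fun p => ((p.2 : Nat) : Int)) := by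
  induction xs with
  | nil => intro c m; simp [pvRunLensAux, pvRunsAux]
  | cons x xs ih =>
    intro c m
    by_cases hx : x == c
    · rw [show pvRunLensAux c (m : Int) (x :: xs) = pvRunLensAux c ((m : Int) + 1) xs by
          simp [pvRunLensAux, hx],
        show pvRunsAux c m (x :: xs) = pvRunsAux c (m + 1) xs by simp [pvRunsAux, hx],
        show ((m : Int) + 1) = ((m + 1 : Nat) : Int) by push_cast; ring]
      exact ih c (m + 1)
    · rw [show pvRunLensAux c (m : Int) (x :: xs) = (m : Int) :: pvRunLensAux x 1 xs by
          simp [pvRunLensAux, hx],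
        show pvRunsAux c m (x :: xs) = (c, m) :: pvRunsAux x 1 xs by simp [pvRunsAux, hx]]
      simp only [List.map_cons]
      congr 1
      have := ih x 1
      simpa using this

lemma pvRunsAux_flatten (xs : List Char) : ∀ (c : Char) (n : Nat),
    ((pvRunsAux c n xs).map (fun p => List.replicate p.2 p.1)).flatten = List.replicate n c ++ xs := by
  induction xs with
  | nil => intro c n; simp [pvRunsAux]
  | cons x xs ih =>
    intro c n
    by_cases hx : x == c
    · have hc : x = c := by simpa using hx
      subst hc
      rw [show pvRunsAux x n (x :: xs) = pvRunsAux x (n + 1) xs by simp [pvRunsAux]]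
      rw [ih x (n + 1), List.replicate_add]
      simp
    · rw [show pvRunsAux c n (x :: xs) = (c, n) :: pvRunsAux x 1 xs by simp [pvRunsAux, hx]]
      simp [ih x 1]

lemma pvRunsAux_pos (xs : List Char) : ∀ (c : Char) (n : Nat), 1 ≤ n →
    ∀ p ∈ pvRunsAux c n xs, 1 ≤ p.2 ∧ p.2 ≤ n + xs.length := by
  induction xs with
  | nil =>
    intro c n hn p hp
    have hpe : p = (c, n) := by simpa [pvRunsAux] using hp
    subst hpe
    simpa using hn
  | cons x xs ih =>
    intro c n hn p hp
    by_cases hx : x == c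
    · rw [show pvRunsAux c n (x :: xs) = pvRunsAux c (n + 1) xs by simp [pvRunsAux, hx]] at hp
      have := ih c (n + 1) (by omega) p hp
      refine ⟨this.1, ?_⟩
      have := this.2
      simp only [List.length_cons]
      omega
    · rw [show pvRunsAux c n (x :: xs) = (c, n) :: pvRunsAux x 1 xs by simp [pvRunsAux, hx]] at hp
      rcases List.mem_cons.mp hp with hp | hp
      · subst hp
        exact ⟨hn, by simp only [List.length_cons]; omega⟩
      · have := ih x 1 (le_refl 1) p hp
        refine ⟨this.1, ?_⟩
        have := this.2
        simp only [List.length_cons]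
        omega

-- each maximal-run block is an infix of the decomposed list
lemma pvRunsAux_block_infix (xs : List Char) (c : Char) (n : Nat) (p : Char × Nat)
    (hp : p ∈ pvRunsAux c n xs) :
    List.replicate p.2 p.1 <:+: (List.replicate n c ++ xs) := by
  rw [← pvRunsAux_flatten xs c n]
  exact List.infix_of_mem_flatten (List.mem_map_of_mem hp)

-- the head run of pvRunsAux c n xs has length at least n
lemma pvRunsAux_head_ge (xs : List Char) : ∀ (c : Char) (n k : Nat), k ≤ n →
    ∃ p ∈ pvRunsAux c n xs, k ≤ p.2 := by
  induction xs with
  | nil => intro c n k hk; exact ⟨(c, n), by simp [pvRunsAux], hk⟩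
  | cons x xs ih =>
    intro c n k hk
    by_cases hx : x == c
    · rw [show pvRunsAux c n (x :: xs) = pvRunsAux c (n + 1) xs by simp [pvRunsAux, hx]]
      exact ih c (n + 1) k (by omega)
    · rw [show pvRunsAux c n (x :: xs) = (c, n) :: pvRunsAux x 1 xs by simp [pvRunsAux, hx]]
      exact ⟨(c, n), List.mem_cons_self .., hk⟩

-- a constant infix either fits in the leading run or lies in the remainder
lemma pvSplit (d c x : Char) (k n : Nat) (xs : List Char) (hk : 1 ≤ k) (hx : x ≠ c)
    (h : List.replicate k d <:+: (List.replicate n c ++ x :: xs)) :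
    (d = c ∧ k ≤ n) ∨ List.replicate k d <:+: (x :: xs) := by
  obtain ⟨s, u, hsu⟩ := h
  by_cases hm : n ≤ s.length
  · right
    refine ⟨s.drop n, u, ?_⟩
    have h2 := congrArg (List.drop n) hsu
    rw [List.drop_append_of_le_length (by simp; omega),
        List.drop_append_of_le_length hm] at h2
    rwa [show (List.replicate n c ++ x :: xs).drop n = x :: xs by
      rw [List.drop_append_of_le_length (by simp), List.drop_replicate, Nat.sub_self]
      simp] at h2
  · left
    replace hm : s.length < n := by omega
    have key : List.replicate k d = ((List.replicate n c ++ x :: xs).drop s.length).take k := by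
      rw [← hsu, List.append_assoc, List.drop_left,
          List.take_append_of_le_length (by simp), List.take_replicate, min_self]
    rw [List.drop_append_of_le_length (by simp; omega), List.drop_replicate] at key
    by_cases hkj : k ≤ n - s.length
    · have : List.replicate k d = List.replicate k c := by
        rw [key, List.take_append_of_le_length (by simp; omega), List.take_replicate,
            min_eq_left hkj]
      have hd : d = c := by
        have hmem : d ∈ List.replicate k c := this ▸ List.mem_replicate.mpr ⟨by omega, rfl⟩
        exact List.eq_of_mem_replicate hmem
      exact ⟨hd, by omega⟩
    · exfalso
      replace hkj : n - s.length < k := by omega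
      rw [List.take_append] at key
      rw [List.take_replicate, min_eq_right (by simp; omega)] at key
      have hcd : c = d := by
        have hmem : c ∈ List.replicate k d := by
          rw [key]
          exact List.mem_append_left _
            (List.mem_replicate.mpr ⟨Nat.sub_ne_zero_of_lt hm, rfl⟩)
        exact List.eq_of_mem_replicate hmem
      have hxd : x = d := by
        have hmem : x ∈ List.replicate k d := by
          rw [key]
          refine List.mem_append_right _ ?_
          simp only [List.length_replicate]
          rw [show k - (n - s.length) = (k - (n - s.length) - 1) + 1 by omega,
            List.take_succ_cons]
          exact List.mem_cons_self ..
        exact List.eq_of_mem_replicate hmem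
      exact hx (hxd.trans hcd.symm)

-- a constant infix of length ≥ 1 is contained in one maximal run
lemma pvRunsAux_of_infix (xs : List Char) : ∀ (c d : Char) (n k : Nat), 1 ≤ k → 1 ≤ n →
    List.replicate k d <:+: (List.replicate n c ++ xs) →
    ∃ p ∈ pvRunsAux c n xs, k ≤ p.2 := by
  induction xs with
  | nil =>
    intro c d n k hk hn h
    have hs := List.sublist_replicate_iff.mp (by simpa using h.sublist)
    obtain ⟨m, hm, he⟩ := hs
    have hkm : k = m := by
      have := congrArg List.length he
      simpa using this
    exact pvRunsAux_head_ge [] c n k (by omega)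
  | cons x xs ih =>
    intro c d n k hk hn h
    by_cases hx : x = c
    · subst hx
      have h' : List.replicate k d <:+: (List.replicate (n + 1) x ++ xs) := by
        rw [show List.replicate (n + 1) x ++ xs = List.replicate n x ++ x :: xs by
          rw [List.replicate_add]; simp]
        exact h
      rw [show pvRunsAux x n (x :: xs) = pvRunsAux x (n + 1) xs by simp [pvRunsAux]]
      exact ih x d (n + 1) k hk (by omega) h'
    · rcases pvSplit d c x k n xs hk hx h with ⟨hd, hkn⟩ | h'
      · rw [show pvRunsAux c n (x :: xs) = (c, n) :: pvRunsAux x 1 xs by simp [pvRunsAux, hx]]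
        exact ⟨(c, n), List.mem_cons_self .., hkn⟩
      · have h'' : List.replicate k d <:+: (List.replicate 1 x ++ xs) := by simpa using h'
        rw [show pvRunsAux c n (x :: xs) = (c, n) :: pvRunsAux x 1 xs by simp [pvRunsAux, hx]]
        obtain ⟨p, hp, hkp⟩ := ih x d 1 k hk (le_refl 1) h''
        exact ⟨p, List.mem_cons_of_mem _ hp, hkp⟩

-- ---- the feasibility test decides 'k ≤ longest run' ----

lemma pvHasRun_iff (c : Char) (rest : List Char) (k : Int) (hk : 1 ≤ k) :
    pvHasRun (c :: rest) k = true ↔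
      k ≤ ((pvRunsAux c 1 rest).map (fun p => ((p.2 : Nat) : Int))).foldl max 1 := by
  have hset : pvHasRun (c :: rest) k = true ↔
      ∃ d ∈ (c :: rest), List.replicate k.toNat d <:+: (c :: rest) := by
    simp [pvHasRun, List.any_eq_true, PySem.Set.mem_ofList, PySem.List.pyRepeat_singleton,
      PySem.Chars.isIn_iff_infix]
  rw [hset]
  constructor
  · rintro ⟨d, hd, hinf⟩
    obtain ⟨p, hp, hkp⟩ := pvRunsAux_of_infix rest c d 1 k.toNat (by omega) (le_refl 1)
      (by simpa using hinf)
    have hle := (PySem.List.le_foldl_max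
      ((pvRunsAux c 1 rest).map (fun p => ((p.2 : Nat) : Int))) 1).2
      (((p.2 : Nat) : Int)) (List.mem_map_of_mem hp)
    have hkc : k ≤ ((p.2 : Nat) : Int) := by omega
    omega
  · intro hkM
    rcases PySem.List.foldl_max_mem
        ((pvRunsAux c 1 rest).map (fun p => ((p.2 : Nat) : Int))) 1 with hM | hM
    · refine ⟨c, List.mem_cons_self .., ?_⟩
      have hk1 : k.toNat = 1 := by omega
      rw [hk1, show List.replicate 1 c = [c] by rfl]
      exact ⟨[], rest, rfl⟩
    · obtain ⟨p, hp, hpe⟩ := List.mem_map.mp hM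
      have hkp : k.toNat ≤ p.2 := by omega
      have hbl := pvRunsAux_block_infix rest c 1 p hp
      have hpre : List.replicate k.toNat p.1 <+: List.replicate p.2 p.1 :=
        ⟨List.replicate (p.2 - k.toNat) p.1, by rw [← List.replicate_add, Nat.add_sub_cancel' hkp]⟩
      have hinf : List.replicate k.toNat p.1 <:+: (c :: rest) := by
        have := hpre.isInfix.trans hbl
        simpa using this
      refine ⟨p.1, ?_, hinf⟩
      exact hinf.subset (List.mem_replicate.mpr ⟨by omega, rfl⟩)

-- ---- the binary search finds the unique M with 'feasible(k) ↔ k ≤ M' ----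

-- the binary-search midpoint (lo + hi + 1) // 2 lies strictly above lo and at most hi
lemma pvMid_bounds (lo hi : Int) (h : lo < hi) :
    lo < PySem.Int.floordiv (lo + hi + 1) 2 ∧ PySem.Int.floordiv (lo + hi + 1) 2 ≤ hi := by
  rw [PySem.Int.floordiv_eq_ediv_of_pos (by norm_num)]
  omega

lemma pvBS_eq (t : List Char) (M : Int)
    (hP : ∀ k : Int, 1 ≤ k → (pvHasRun t k = true ↔ k ≤ M)) :
    ∀ (n : Nat) (lo hi : Int), (hi - lo).toNat ≤ n → 1 ≤ lo → lo ≤ M → M ≤ hi →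
      pvBS t n lo hi = M := by
  intro n
  induction n with
  | zero =>
    intro lo hi hn h1 hloM hMhi
    simp only [pvBS]
    omega
  | succ n ih =>
    intro lo hi hn h1 hloM hMhi
    rw [pvBS]
    by_cases h : lo < hi
    · rw [if_pos h]
      obtain ⟨hm1, hm2⟩ := pvMid_bounds lo hi h
      by_cases hp : pvHasRun t (PySem.Int.floordiv (lo + hi + 1) 2) = true
      · rw [if_pos hp]
        have hmM : PySem.Int.floordiv (lo + hi + 1) 2 ≤ M := (hP _ (by omega)).mp hp
        exact ih _ _ (by omega) (by omega) hmM hMhi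
      · rw [if_neg hp]
        have hnm : ¬ (PySem.Int.floordiv (lo + hi + 1) 2 ≤ M) := fun hc =>
          hp ((hP _ (by omega)).mpr hc)
        exact ih _ _ (by omega) h1 hloM (by omega)
    · rw [if_neg h]
      omega

-- ---- the uppercase-word predicates agree ----

lemma pvToNat_ofNat (n : Nat) (h : n < 55296) : (Char.ofNat n).toNat = n := by
  simp [Char.ofNat, h, Nat.isValidChar]

lemma pvChu (a : Char) : (a == PySem.Chars.upperChar a) = !PySem.Chars.islower a := by
  by_cases h : PySem.Chars.islower a = true
  · have hb : 97 ≤ a.toNat ∧ a.toNat ≤ 122 := by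
      unfold PySem.Chars.islower at h
      rw [Bool.and_eq_true, decide_eq_true_iff, decide_eq_true_iff] at h
      obtain ⟨h1, h2⟩ := h
      rw [Char.le_def] at h1 h2
      have h1' := UInt32.le_iff_toNat_le.mp h1
      have h2' := UInt32.le_iff_toNat_le.mp h2
      rw [show ('a' : Char).val.toNat = 97 by decide] at h1'
      rw [show ('z' : Char).val.toNat = 122 by decide] at h2'
      exact ⟨h1', h2'⟩
    have hne : ¬ (a = PySem.Chars.upperChar a) := by
      intro he
      have h2 := congrArg Char.toNat he
      rw [show PySem.Chars.upperChar a = Char.ofNat (a.toNat - 32) by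
        simp [PySem.Chars.upperChar, h]] at h2
      rw [pvToNat_ofNat (a.toNat - 32) (by omega)] at h2
      omega
    simp [h, hne]
  · have h' : PySem.Chars.islower a = false := by simpa using h
    simp [PySem.Chars.upperChar, h']

lemma pvChl (a : Char) : (a == PySem.Chars.lowerChar a) = !PySem.Chars.isupper a := by
  by_cases h : PySem.Chars.isupper a = true
  · have hb : 65 ≤ a.toNat ∧ a.toNat ≤ 90 := by
      unfold PySem.Chars.isupper at h
      rw [Bool.and_eq_true, decide_eq_true_iff, decide_eq_true_iff] at h
      obtain ⟨h1, h2⟩ := h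
      rw [Char.le_def] at h1 h2
      have h1' := UInt32.le_iff_toNat_le.mp h1
      have h2' := UInt32.le_iff_toNat_le.mp h2
      rw [show ('A' : Char).val.toNat = 65 by decide] at h1'
      rw [show ('Z' : Char).val.toNat = 90 by decide] at h2'
      exact ⟨h1', h2'⟩
    have hne : ¬ (a = PySem.Chars.lowerChar a) := by
      intro he
      have h2 := congrArg Char.toNat he
      rw [show PySem.Chars.lowerChar a = Char.ofNat (a.toNat + 32) by
        simp [PySem.Chars.lowerChar, h]] at h2
      rw [pvToNat_ofNat (a.toNat + 32) (by omega)] at h2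
      omega
    simp [h, hne]
  · have h' : PySem.Chars.isupper a = false := by simpa using h
    simp [PySem.Chars.lowerChar, h']

lemma pvUpperEq (w : List Char) :
    (w == PySem.Chars.upper w) = w.all (fun c => !PySem.Chars.islower c) := by
  induction w with
  | nil => rfl
  | cons a l ih =>
    simp only [PySem.Chars.upper, List.map_cons, List.all_cons] at *
    rw [List.cons_beq_cons, ih, pvChu]

lemma pvLowerNe (w : List Char) :
    (!(w == PySem.Chars.lower w)) = w.any PySem.Chars.isupper := by
  induction w with
  | nil => rfl
  | cons a l ih =>
    simp only [PySem.Chars.lower, List.map_cons, List.any_cons] at *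
    rw [List.cons_beq_cons, Bool.not_and, ih, pvChl, Bool.not_not]

lemma pvIsupper_eq (w : List Char) :
    ((w == PySem.Chars.upper w) && !(w == PySem.Chars.lower w)) = pvStrIsupper w := by
  rw [pvUpperEq, pvLowerNe, pvStrIsupper, Bool.and_comm]

-- the third components agree, for any token list
lemma pvUpperFold (tokens : List (List Char)) :
    tokens.foldl (fun acc w =>
        if ((w == PySem.Chars.upper w) && !(w == PySem.Chars.lower w))
            && decide (1 < PySem.Chars.len w) then acc + 1 else acc) (0 : Int)
    = tokens.foldl
        (fun acc tok => if pvStrIsupper tok && decide (1 < PySem.Chars.len tok) then acc + 1 else acc) 0 := by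
  refine PySem.List.foldl_congr_mem tokens _ _ 0 ?_
  intro acc w _
  rw [pvIsupper_eq]

-- ===== VERDICT (by name: the statement is the Claim_ definition above) =====
theorem compute_intensity_features_spec : Claim_equal_compute_intensity_features := by
  intro text _
  unfold Spec_compute_intensity_features compute_intensity_features compute_intensity_features_alt
  simp only []
  cases ht : text.toList with
  | nil =>
    refine Prod.ext rfl (Prod.ext ?_ (pvUpperFold _).symm)
    simp only [PySem.List.len_eq, List.length_nil, Nat.cast_zero]
    rw [show max (0 : Int) 1 = 1 by omega]
    norm_num [pvBS, PySem.List.pyRange]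
  | cons c rest =>
    refine Prod.ext rfl (Prod.ext ?_ (pvUpperFold _).symm)
    · -- max-run component
      dsimp only
      have L := pvLoop rest [] c 1 1 (le_refl 1) (le_refl 1)
      simp only [List.nil_append, List.length_nil, Nat.cast_zero, zero_add] at L
      rw [show PySem.List.len (c :: rest) = 1 + (rest.length : Int) by
        simp [PySem.List.len_eq]; ring]
      rw [show (1 : Int) + (rest.length : Int) = 0 + 1 + (rest.length : Int) by ring]
      refine Eq.trans L ?_
      -- now both sides against M := foldl max 1 over the cast run lengths
      have hcast : pvRunLensAux c 1 rest
          = (pvRunsAux c 1 rest).map (fun p => ((p.2 : Nat) : Int)) := by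
        have := pvRunLens_cast rest c 1
        simpa using this
      rw [hcast]
      set M : Int := ((pvRunsAux c 1 rest).map (fun p => ((p.2 : Nat) : Int))).foldl max 1 with hM
      have h1M : 1 ≤ M := (PySem.List.le_foldl_max _ 1).1
      have hMlen : M ≤ 1 + (rest.length : Int) := by
        rcases PySem.List.foldl_max_mem
            ((pvRunsAux c 1 rest).map (fun p => ((p.2 : Nat) : Int))) 1 with hm | hm
        · rw [← hM] at hm; omega
        · rw [← hM] at hm
          obtain ⟨p, hp, hpe⟩ := List.mem_map.mp hm
          have := (pvRunsAux_pos rest c 1 (le_refl 1) p hp).2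
          omega
      symm
      refine pvBS_eq (c :: rest) M (fun k hk => ?_)
        ((max (0 + 1 + (rest.length : Int)) 1) - 1).toNat 1 _ (le_refl _) (le_refl 1) h1M ?_
      · rw [hM]
        exact pvHasRun_iff c rest k hk
      · have hlen : (0 : Int) + 1 + (rest.length : Int) = 1 + (rest.length : Int) := by ring
        rw [hlen]
        have : (1 : Int) + (rest.length : Int) ≤ max (1 + (rest.length : Int)) 1 :=
          le_max_left _ _
        omega
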